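-- pv_equiv track=rewrite | github.com/mathortitas/Practica05 | Ejercicios/P05-5.py | clasificar_multiplos
-- ===== SOURCE A (Python) =====
-- def clasificar_multiplos(lista):
--     multiplos_2 = []
--     multiplos_3 = []
--     multiplos_5 = []
--     for num in lista:
--         if num % 2 == 0:
--             multiplos_2.append(num)
--         if num % 3 == 0:
--             multiplos_3.append(num)
--         if num % 5 == 0:
--             multiplos_5.append(num)
--     return multiplos_2, multiplos_3, multiplos_5
-- ===== SOURCE B (Python) =====
-- def clasificar_multiplos(lista):
--     return ([n for n in lista if n % 2 == 0],
--             [n for n in lista if n % 3 == 0],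
--             [n for n in lista if n % 5 == 0])
-- ===== Notes on version B (the rewrite author's own statement) =====
-- stated objective: idiomatic
-- what changed: Replaces the single loop mutating three accumulator lists with three independent filter comprehensions, one per divisor, returned as a tuple.
import Mathlib
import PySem

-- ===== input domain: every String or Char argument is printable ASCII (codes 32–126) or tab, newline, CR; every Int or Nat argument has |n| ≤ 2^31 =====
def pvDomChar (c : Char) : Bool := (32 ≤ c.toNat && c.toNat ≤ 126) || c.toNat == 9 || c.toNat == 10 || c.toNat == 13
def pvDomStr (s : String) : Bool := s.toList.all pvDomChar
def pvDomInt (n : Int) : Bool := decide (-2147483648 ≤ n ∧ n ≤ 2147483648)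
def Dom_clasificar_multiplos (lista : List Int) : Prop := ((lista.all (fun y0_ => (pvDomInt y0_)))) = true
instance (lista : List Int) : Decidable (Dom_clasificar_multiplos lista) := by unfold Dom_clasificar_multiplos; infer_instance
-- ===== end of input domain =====

-- ===== PORT A =====
-- Single pass: fold over the list, appending to each accumulator as A's loop does.
-- divisors are positive, so Lean's Int % matches Python's %
def clasificar_multiplos (lista : List Int) : List Int × List Int × List Int :=
  lista.foldl
    (fun acc num =>
      let acc := if num % 2 == 0 then (acc.1 ++ [num], acc.2.1, acc.2.2) else acc
      let acc := if num % 3 == 0 then (acc.1, acc.2.1 ++ [num], acc.2.2) else acc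
      if num % 5 == 0 then (acc.1, acc.2.1, acc.2.2 ++ [num]) else acc)
    ([], [], [])

-- ===== PORT B =====
-- Three independent filters, one per divisor.
def clasificar_multiplos_alt (lista : List Int) : List Int × List Int × List Int :=
  (lista.filter (fun n => n % 2 == 0),
   lista.filter (fun n => n % 3 == 0),
   lista.filter (fun n => n % 5 == 0))

-- ===== PRECONDITION & SPEC =====
def Spec_clasificar_multiplos (lista : List Int) (out : List Int × List Int × List Int) : Prop := out = clasificar_multiplos_alt lista
instance (lista : List Int) (out : List Int × List Int × List Int) : Decidable (Spec_clasificar_multiplos lista out) := by unfold Spec_clasificar_multiplos; infer_instance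

-- ===== CLAIM (what is proved, stated in full; the proofs are below) =====
def Claim_equal_clasificar_multiplos : Prop := ∀ (lista : List Int), Dom_clasificar_multiplos lista → Spec_clasificar_multiplos lista (clasificar_multiplos lista)

-- ===== LEMMAS AND PROOFS =====

-- ===== VERDICT (by name: the statement is the Claim_ definition above) =====
theorem foldl_acc (lista : List Int) (acc : List Int × List Int × List Int) :
    lista.foldl
      (fun acc num =>
        let acc := if num % 2 == 0 then (acc.1 ++ [num], acc.2.1, acc.2.2) else acc
        let acc := if num % 3 == 0 then (acc.1, acc.2.1 ++ [num], acc.2.2) else acc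
        if num % 5 == 0 then (acc.1, acc.2.1, acc.2.2 ++ [num]) else acc)
      acc
    = (acc.1 ++ lista.filter (fun n => n % 2 == 0),
       acc.2.1 ++ lista.filter (fun n => n % 3 == 0),
       acc.2.2 ++ lista.filter (fun n => n % 5 == 0)) := by
  induction lista generalizing acc with
  | nil => simp
  | cons x xs ih =>
    rw [List.foldl_cons, ih]
    simp only [List.filter_cons]
    split_ifs <;> simp

theorem clasificar_multiplos_spec : Claim_equal_clasificar_multiplos := by
  intro lista _
  unfold Spec_clasificar_multiplos clasificar_multiplos clasificar_multiplos_alt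
  simpa using foldl_acc lista ([], [], [])
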